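-- pv_equiv track=rewrite | github.com/zhikaizhong0827/CS485-Recipes-Pairing-Prediction | preprocessing.py | refine_ingredient_mapping
-- ===== SOURCE A (Python) =====
-- def refine_ingredient_mapping(ingredients):
--     mapping = {}
--     for ing in ingredients:
--         # 找出所有作为 ing 的子串的食材（不包括自身）
--         candidates = [cand for cand in ingredients if cand != ing and cand in ing]
--         if candidates:
--             # 取候选中长度最小的一个
--             mapping[ing] = min(candidates, key=len)
--         else:
--             mapping[ing] = ing
--     return mapping
-- ===== SOURCE B (Python) =====
-- def refine_ingredient_mapping(ingredients):
--     # Sort once by length (stable), then for each ingredient take the FIRST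
--     # length-sorted other ingredient that is a substring of it; stability makes
--     # this exactly min(candidates, key=len)'s tie-breaking.
--     by_len = sorted(ingredients, key=len)
--     mapping = {}
--     for ing in ingredients:
--         if ing in mapping:
--             continue
--         mapping[ing] = next((c for c in by_len if c != ing and c in ing), ing)
--     return mapping
-- ===== Notes on version B (the rewrite author's own statement) =====
-- stated objective: faster
-- what changed: B sorts the ingredients by length once and, per ingredient, takes the first length-sorted other-substring (early exit at the shortest match) and skips duplicate keys, instead of A's per-ingredient full candidate-list build followed by min(key=len).
import Mathlib
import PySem

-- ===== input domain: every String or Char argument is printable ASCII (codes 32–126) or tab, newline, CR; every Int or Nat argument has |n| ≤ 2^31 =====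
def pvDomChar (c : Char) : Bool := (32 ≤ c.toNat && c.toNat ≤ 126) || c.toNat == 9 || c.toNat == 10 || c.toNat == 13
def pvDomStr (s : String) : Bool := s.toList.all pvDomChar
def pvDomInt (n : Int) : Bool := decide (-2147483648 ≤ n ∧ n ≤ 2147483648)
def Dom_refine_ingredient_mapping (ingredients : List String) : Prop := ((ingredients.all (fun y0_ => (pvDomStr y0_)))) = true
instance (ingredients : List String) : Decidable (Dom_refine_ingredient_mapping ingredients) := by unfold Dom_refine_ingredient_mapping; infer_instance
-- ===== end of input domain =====

-- B sorts the ingredient list by length once and takes, per ingredient, the first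
-- length-sorted other-substring (skipping duplicate keys), instead of A's
-- per-ingredient full candidate list followed by min(key=len): alternative algorithm,
-- same return value (equivalence proved below).

-- ===== PORT A =====
def refine_ingredient_mapping (ingredients : List String) : List (String × String) :=
  (ingredients.foldl (fun mapping ing =>
      -- candidates = [cand for cand in ingredients if cand != ing and cand in ing]
      if !(ingredients.filter (fun cand => cand != ing && PySem.Str.isIn cand ing)).isEmpty then
        -- mapping[ing] = min(candidates, key=len)
        mapping.insert ing
          ((PySem.List.min? (ingredients.filter (fun cand => cand != ing && PySem.Str.isIn cand ing))
              PySem.Str.len).getD ing)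
      else
        mapping.insert ing ing)
    PySem.Dict.empty).items

-- ===== PORT B =====
def refine_ingredient_mapping_alt (ingredients : List String) : List (String × String) :=
  let byLen := PySem.List.sorted ingredients PySem.Str.len
  (ingredients.foldl (fun mapping ing =>
      if mapping.contains ing then mapping
      else mapping.insert ing
        ((byLen.find? (fun c => c != ing && PySem.Str.isIn c ing)).getD ing))
    PySem.Dict.empty).items

-- ===== PRECONDITION & SPEC =====
def Spec_refine_ingredient_mapping (ingredients : List String) (out : List (String × String)) : Prop := out = refine_ingredient_mapping_alt ingredients
instance (ingredients : List String) (out : List (String × String)) : Decidable (Spec_refine_ingredient_mapping ingredients out) := by unfold Spec_refine_ingredient_mapping; infer_instance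

-- ===== CLAIM (what is proved, stated in full; the proofs are below) =====
def Claim_equal_refine_ingredient_mapping : Prop := ∀ (ingredients : List String), Dom_refine_ingredient_mapping ingredients → Spec_refine_ingredient_mapping ingredients (refine_ingredient_mapping ingredients)

-- ===== LEMMAS AND PROOFS =====

theorem pv_insertBy_nil {α : Type} (b : α → α → Bool) (x : α) :
    PySem.List.insertBy b x [] = [x] := rfl

theorem pv_insertBy_cons {α : Type} (b : α → α → Bool) (x y : α) (ys : List α) :
    PySem.List.insertBy b x (y :: ys) =
      if b x y then x :: y :: ys else y :: PySem.List.insertBy b x ys := rfl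

theorem pv_sorted_append_singleton {α κ : Type} [LinearOrder κ] (key : α → κ)
    (l : List α) (x : α) :
    PySem.List.sorted (l ++ [x]) key =
      PySem.List.insertBy (fun a b => decide (key a < key b)) x (PySem.List.sorted l key) := by
  simp [PySem.List.sorted, List.foldl_append]

-- min(xs, key) is the head of the stable length-sorted list
theorem pv_min?_eq_head_sorted {α κ : Type} [LinearOrder κ] (key : α → κ) (xs : List α) :
    PySem.List.min? xs key = (PySem.List.sorted xs key).head? := by
  induction xs using List.reverseRecOn with
  | nil => rfl
  | append_singleton l x ih =>
    rw [pv_sorted_append_singleton]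
    unfold PySem.List.min? at ih ⊢
    rw [List.foldl_append]
    simp only [List.foldl_cons, List.foldl_nil]
    rw [ih]
    rcases h : PySem.List.sorted l key with _ | ⟨m, t⟩
    · rfl
    · simp only [List.head?_cons, pv_insertBy_cons]
      by_cases hx : key x < key m <;> simp [hx]

-- stability: filtering commutes with inserting into a key-sorted list
theorem pv_filter_insertBy {α κ : Type} [LinearOrder κ] (key : α → κ) (P : α → Bool) (x : α) :
    ∀ l : List α, l.Pairwise (fun a b => key a ≤ key b) →
    (PySem.List.insertBy (fun a b => decide (key a < key b)) x l).filter P =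
      if P x then PySem.List.insertBy (fun a b => decide (key a < key b)) x (l.filter P)
      else l.filter P := by
  intro l
  induction l with
  | nil => intro _; by_cases hP : P x <;> simp [pv_insertBy_nil, hP, List.filter]
  | cons y ys ih =>
    intro hpair
    have hy : ∀ z ∈ ys, key y ≤ key z := (List.pairwise_cons.mp hpair).1
    have hys : ys.Pairwise (fun a b => key a ≤ key b) := (List.pairwise_cons.mp hpair).2
    rw [pv_insertBy_cons]
    by_cases hlt : key x < key y
    · simp only [hlt, decide_true, if_true]
      by_cases hP : P x
      · -- x goes to the front of the filtered list too
        have hfront : ∀ (l' : List α), (∀ z ∈ l', key x < key z) →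
            PySem.List.insertBy (fun a b => decide (key a < key b)) x l' = x :: l' := by
          intro l' hl'
          cases l' with
          | nil => rfl
          | cons z zs => rw [pv_insertBy_cons]; simp [hl' z (by simp)]
        rw [if_pos hP, hfront]
        · simp [List.filter_cons, hP]
        · intro z hz
          have : z = y ∨ z ∈ ys := by
            rcases List.mem_filter.mp hz with ⟨hz', _⟩
            simpa using hz'
          rcases this with rfl | hz'
          · exact hlt
          · exact lt_of_lt_of_le hlt (hy z hz')
      · simp [List.filter_cons, hP]
    · simp only [hlt, decide_false, Bool.false_eq_true, if_false]
      rw [List.filter_cons, List.filter_cons]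
      by_cases hPy : P y
      · simp only [hPy, if_true]
        rw [ih hys]
        by_cases hP : P x
        · simp only [hP, if_true, pv_insertBy_cons]
          simp [hlt]
        · simp [hP]
      · simp only [hPy]
        exact ih hys
  
-- stability: filter commutes with the stable sort
theorem pv_filter_sorted {α κ : Type} [LinearOrder κ] (key : α → κ) (P : α → Bool) (xs : List α) :
    (PySem.List.sorted xs key).filter P = PySem.List.sorted (xs.filter P) key := by
  induction xs using List.reverseRecOn with
  | nil => rfl
  | append_singleton l x ih =>
    rw [pv_sorted_append_singleton, pv_filter_insertBy key P x _ (PySem.List.sorted_pairwise l key),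
        List.filter_append]
    by_cases hP : P x
    · simp only [hP, if_true, List.filter_cons, List.filter_nil]
      rw [ih]
      simpa [hP] using (pv_sorted_append_singleton key (l.filter P) x).symm
    · simp [hP, ih]

-- per-ingredient value: A's "min over the candidate list" equals B's
-- "first length-sorted match"
theorem pv_value_eq {α κ : Type} [LinearOrder κ] (key : α → κ) (P : α → Bool)
    (xs : List α) (dflt : α) :
    (if !(xs.filter P).isEmpty then (PySem.List.min? (xs.filter P) key).getD dflt else dflt)
      = ((PySem.List.sorted xs key).find? P).getD dflt := by
  rw [← List.head?_filter, pv_filter_sorted, ← pv_min?_eq_head_sorted]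
  rcases h : xs.filter P with _ | ⟨m, t⟩
  · simp [PySem.List.min?]
  · have : PySem.List.min? (m :: t) key ≠ none := by
      intro hc
      exact (List.cons_ne_nil m t) ((PySem.List.min?_eq_none_iff _ _).mp hc)
    rcases ho : PySem.List.min? (m :: t) key with _ | v
    · exact absurd ho this
    · simp

theorem pv_dict_ext {κ ν : Type} (a b : PySem.Dict κ ν) (h : a.items = b.items) : a = b := by
  cases a; cases b; simpa using h

-- re-inserting a key with the value it already has is a no-op
theorem pv_insert_same (d : PySem.Dict String String) (v : String → String) (k : String)
    (hinv : ∀ p ∈ d.items, p.2 = v p.1) (hc : d.contains k = true) :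
    d.insert k (v k) = d := by
  apply pv_dict_ext
  rw [PySem.Dict.items_insert_of_contains d (v k) hc]
  have hcong : ∀ p ∈ d.items, (if p.1 == k then (k, v k) else p) = id p := by
    intro p hp
    by_cases hk : p.1 == k
    · have h1 : p.1 = k := eq_of_beq hk
      have h2 : p.2 = v p.1 := hinv p hp
      simp only [hk, if_true, id]
      rw [← h1, ← h2]
    · simp [hk]
  rw [List.map_congr_left hcong, List.map_id]

-- the two dict-building loops agree when every stored value is v of its key
theorem pv_fold_eq (v : String → String) :
    ∀ (l : List String) (d : PySem.Dict String String),
      (∀ p ∈ d.items, p.2 = v p.1) →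
      l.foldl (fun m ing => m.insert ing (v ing)) d
        = l.foldl (fun m ing => if m.contains ing then m else m.insert ing (v ing)) d := by
  intro l
  induction l with
  | nil => intro d _; rfl
  | cons ing rest ih =>
    intro d hinv
    simp only [List.foldl_cons]
    by_cases hc : d.contains ing = true
    · rw [if_pos hc, pv_insert_same d v ing hinv hc]
      exact ih d hinv
    · rw [if_neg hc]
      apply ih
      intro p hp
      rcases (PySem.Dict.mem_items_insert d ing (v ing) p).mp hp with rfl | ⟨hp', _⟩
      · rfl
      · exact hinv p hp'

-- ===== VERDICT (by name: the statement is the Claim_ definition above) =====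
theorem refine_ingredient_mapping_spec : Claim_equal_refine_ingredient_mapping := by
  intro ingredients _
  unfold Spec_refine_ingredient_mapping refine_ingredient_mapping refine_ingredient_mapping_alt
  congr 1
  have hstep : (fun (mapping : PySem.Dict String String) (ing : String) =>
      if !(ingredients.filter (fun cand => cand != ing && PySem.Str.isIn cand ing)).isEmpty then
        mapping.insert ing
          ((PySem.List.min? (ingredients.filter (fun cand => cand != ing && PySem.Str.isIn cand ing))
              PySem.Str.len).getD ing)
      else
        mapping.insert ing ing)
      = (fun (mapping : PySem.Dict String String) (ing : String) =>
          mapping.insert ing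
            (((PySem.List.sorted ingredients PySem.Str.len).find?
                (fun c => c != ing && PySem.Str.isIn c ing)).getD ing)) := by
    funext mapping ing
    rw [← pv_value_eq PySem.Str.len (fun c => c != ing && PySem.Str.isIn c ing) ingredients ing]
    split_ifs <;> rfl
  rw [hstep]
  exact pv_fold_eq _ ingredients PySem.Dict.empty (by simp [PySem.Dict.empty])
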